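-- pv_equiv track=rewrite | github.com/wopozka/pwMapedit | map_items.py | get_numbers_between
-- ===== SOURCE A (Python) =====
-- def get_numbers_between(start_point, end_point, num_style):
--     if (start_point - end_point) in (-1, 0, 1):
--         return []
--     if start_point > end_point:
--         step = -1
--         start_point -= 1
--     else:
--         step = 1
--         start_point += 1
--     numbers = []
--     for a in range(start_point, end_point, step):
--         if num_style == 'E':
--             if a % 2 == 0:
--                 numbers.append(a)
--         elif num_style == 'O':
--             if a % 2 == 1:
--                 numbers.append(a)
--         else:
--             numbers.append(a)
--     return numbers
-- ===== SOURCE B (Python) =====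
-- def get_numbers_between(start_point, end_point, num_style):
--     # Direct construction: compute the endpoints of the open interval, emit the
--     # matching stride-2 (or stride-1) arithmetic progression, reverse if descending.
--     lo, hi = (start_point, end_point) if start_point <= end_point else (end_point, start_point)
--     if hi - lo <= 1:
--         return []
--     if num_style == 'E':
--         nums = list(range(lo + 1 + (lo + 1) % 2, hi, 2))
--     elif num_style == 'O':
--         nums = list(range(lo + 2 - (lo + 1) % 2, hi, 2))
--     else:
--         nums = list(range(lo + 1, hi))
--     if start_point > end_point:
--         nums.reverse()
--     return nums
-- ===== Notes on version B (the rewrite author's own statement) =====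
-- stated objective: alternative
-- what changed: Instead of iterating over every integer between the endpoints and testing each with a modulo inside the loop, B normalizes the endpoints, emits the answer directly as a stride-2 (or stride-1) arithmetic progression starting at the first in-range number of the right parity, and reverses it when the order is descending.
import Mathlib
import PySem

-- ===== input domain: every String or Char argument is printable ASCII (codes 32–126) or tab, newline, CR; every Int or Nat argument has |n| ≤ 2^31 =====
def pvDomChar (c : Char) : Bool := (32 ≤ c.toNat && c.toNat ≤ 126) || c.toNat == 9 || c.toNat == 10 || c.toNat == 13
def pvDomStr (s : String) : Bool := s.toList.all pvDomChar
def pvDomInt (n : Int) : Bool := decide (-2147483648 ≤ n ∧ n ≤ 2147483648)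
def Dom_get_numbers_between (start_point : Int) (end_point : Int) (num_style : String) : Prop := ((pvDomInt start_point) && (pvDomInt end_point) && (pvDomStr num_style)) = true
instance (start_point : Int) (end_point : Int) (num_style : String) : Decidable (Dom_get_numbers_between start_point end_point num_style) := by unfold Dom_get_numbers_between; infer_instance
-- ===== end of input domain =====

-- B replaces A's per-element parity-test loop by direct construction of the stride-2 (or stride-1)
-- arithmetic progression between the normalized endpoints, reversed when descending (alternative decomposition).

-- ===== PORT A =====
-- the loop body of A (branches in source order)
def pvLoopA (num_style : String) (xs : List Int) : List Int :=
  xs.foldl (fun numbers a =>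
    if num_style = "E" then (if a % 2 == 0 then numbers ++ [a] else numbers)
    else if num_style = "O" then (if a % 2 == 1 then numbers ++ [a] else numbers)
    else numbers ++ [a]) []

def get_numbers_between (start_point : Int) (end_point : Int) (num_style : String) : List Int :=
  if start_point - end_point = -1 ∨ start_point - end_point = 0 ∨ start_point - end_point = 1 then []
  else
    let p := if start_point > end_point then (start_point - 1, (-1 : Int)) else (start_point + 1, (1 : Int))
    pvLoopA num_style (PySem.List.pyRange p.1 end_point p.2)

-- ===== PORT B =====
def get_numbers_between_alt (start_point : Int) (end_point : Int) (num_style : String) : List Int :=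
  let lo := if start_point ≤ end_point then start_point else end_point
  let hi := if start_point ≤ end_point then end_point else start_point
  if hi - lo ≤ 1 then []
  else
    let nums :=
      if num_style = "E" then PySem.List.pyRange (lo + 1 + (lo + 1) % 2) hi 2
      else if num_style = "O" then PySem.List.pyRange (lo + 2 - (lo + 1) % 2) hi 2
      else PySem.List.pyRange (lo + 1) hi 1
    if start_point > end_point then nums.reverse else nums

-- ===== PRECONDITION & SPEC =====
def Spec_get_numbers_between (start_point : Int) (end_point : Int) (num_style : String) (out : List Int) : Prop := out = get_numbers_between_alt start_point end_point num_style
instance (start_point : Int) (end_point : Int) (num_style : String) (out : List Int) : Decidable (Spec_get_numbers_between start_point end_point num_style out) := by unfold Spec_get_numbers_between; infer_instance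

-- ===== CLAIM (what is proved, stated in full; the proofs are below) =====
def Claim_equal_get_numbers_between : Prop := ∀ (start_point : Int) (end_point : Int) (num_style : String), Dom_get_numbers_between start_point end_point num_style → Spec_get_numbers_between start_point end_point num_style (get_numbers_between start_point end_point num_style)

-- ===== LEMMAS AND PROOFS =====

-- step-2 ranges: nil and cons forms
lemma pyRange_two_nil {a b : Int} (h : b ≤ a) : PySem.List.pyRange a b 2 = [] := by
  rw [PySem.List.pyRange_of_pos a b (by norm_num)]
  simp [show ¬ a < b from not_lt.mpr h]

lemma pyRange_two_cons {a b : Int} (h : a < b) :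
    PySem.List.pyRange a b 2 = a :: PySem.List.pyRange (a + 2) b 2 := by
  rw [PySem.List.pyRange_of_pos a b (by norm_num), PySem.List.pyRange_of_pos (a + 2) b (by norm_num)]
  by_cases h2 : a + 2 < b
  · have hc : ((b - a + 2 - 1) / 2).toNat = ((b - (a + 2) + 2 - 1) / 2).toNat + 1 := by omega
    rw [if_pos h, if_pos h2, hc, List.range_succ_eq_map, List.map_cons, List.map_map]
    norm_num
    intro k _; ring
  · have hc : ((b - a + 2 - 1) / 2).toNat = 1 := by omega
    rw [if_pos h, if_neg h2, hc]
    simp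

-- a parity filter of a consecutive range is a stride-2 range
lemma filter_parity_eq_pyRange_two (r : Int) (hr : r = 0 ∨ r = 1) :
    ∀ n : Nat, ∀ a b : Int, (b - a).toNat ≤ n →
      (PySem.List.pyRange a b 1).filter (fun x => x % 2 == r) =
        PySem.List.pyRange (a + (r - a) % 2) b 2 := by
  intro n
  induction n with
  | zero =>
    intro a b hn
    rw [PySem.List.pyRange_one_eq_nil (by omega), List.filter_nil, pyRange_two_nil (by omega)]
  | succ n ih =>
    intro a b hn
    by_cases h : a < b
    · rw [PySem.List.pyRange_one_cons h, List.filter_cons, ih (a + 1) b (by omega)]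
      by_cases hp : a % 2 = r
      · rw [if_pos (by simp [hp]), show (r - (a + 1)) % 2 = 1 from by omega,
            show (r - a) % 2 = 0 from by omega, show a + 1 + 1 = a + 2 from by ring,
            show a + 0 = a from by ring, pyRange_two_cons h]
      · rw [if_neg (by simp [hp]), show (r - (a + 1)) % 2 = 0 from by omega,
            show (r - a) % 2 = 1 from by omega, show a + 1 + 0 = a + 1 from by ring]
    · rw [PySem.List.pyRange_one_eq_nil (by omega), List.filter_nil, pyRange_two_nil (by omega)]

lemma filter_even' (lo b : Int) :
    (PySem.List.pyRange (lo + 1) b 1).filter (fun x => x % 2 == 0) =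
      PySem.List.pyRange (lo + 1 + (lo + 1) % 2) b 2 := by
  have h := filter_parity_eq_pyRange_two 0 (Or.inl rfl) (b - (lo + 1)).toNat (lo + 1) b le_rfl
  rwa [show lo + 1 + (0 - (lo + 1)) % 2 = lo + 1 + (lo + 1) % 2 from by omega] at h

lemma filter_odd' (lo b : Int) :
    (PySem.List.pyRange (lo + 1) b 1).filter (fun x => x % 2 == 1) =
      PySem.List.pyRange (lo + 2 - (lo + 1) % 2) b 2 := by
  have h := filter_parity_eq_pyRange_two 1 (Or.inr rfl) (b - (lo + 1)).toNat (lo + 1) b le_rfl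
  rwa [show lo + 1 + (1 - (lo + 1)) % 2 = lo + 2 - (lo + 1) % 2 from by omega] at h

-- A's loop is a parity filter (or the identity) of the traversed range
lemma pvLoopA_eq (ns : String) (xs : List Int) :
    pvLoopA ns xs =
      if ns = "E" then xs.filter (fun x => x % 2 == 0)
      else if ns = "O" then xs.filter (fun x => x % 2 == 1)
      else xs := by
  unfold pvLoopA
  by_cases h1 : ns = "E"
  · subst h1
    simp only [String.reduceEq, reduceIte]
    rw [PySem.List.foldl_append_if (fun x : Int => x % 2 == 0) (fun x => x)]
    simp
  · by_cases h2 : ns = "O"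
    · subst h2
      simp only [String.reduceEq, reduceIte]
      rw [PySem.List.foldl_append_if (fun x : Int => x % 2 == 1) (fun x => x)]
      simp
    · simp only [h1, h2, reduceIte]
      rw [PySem.List.foldl_append_singleton]
      simp


theorem get_numbers_between_spec : Claim_equal_get_numbers_between := by
  intro s e ns _
  show Spec_get_numbers_between s e ns (get_numbers_between s e ns)
  unfold Spec_get_numbers_between get_numbers_between get_numbers_between_alt
  by_cases htriv : s - e = -1 ∨ s - e = 0 ∨ s - e = 1
  · rw [if_pos htriv]
    split_ifs <;> simp_all <;> omega
  · rw [if_neg htriv]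
    by_cases hgt : s > e
    · have hle : ¬ s ≤ e := by omega
      simp only [if_pos hgt, if_neg hle, if_neg (show ¬ (s - e ≤ 1) from by omega)]
      rw [pvLoopA_eq, PySem.List.pyRange_neg_one_eq_reverse, show s - 1 + 1 = s from by ring]
      split_ifs with h1 h2 <;>
        simp only [List.filter_reverse, filter_even', filter_odd']
    · have hle : s ≤ e := by omega
      simp only [if_neg hgt, if_pos hle, if_neg (show ¬ (e - s ≤ 1) from by omega)]
      rw [pvLoopA_eq]
      split_ifs with h1 h2 <;> simp only [filter_even', filter_odd']
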